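-- pv_equiv track=rewrite | github.com/natebakescakes/edx-6.00.1x-problem-sets | optional_assignments/week_4/lecture_wk4c.py | nfruits
-- ===== SOURCE A (Python) =====
-- def nfruits(init_fruits, pattern):
--     """
--     init_fruits: Non-empty dictionary containing initial type of fruit and its
--             quantity initially with Python when he leaves home
--             (length < 10)
--
--             e.g. {'A': 1, 'B': 2, 'C': 3}
--
--     pattern: String pattern of the fruits eaten by Python on his journey
--
--             e.g. 'AABBBBCA'
--
--     return: maximum quantity out of the different types of fruits that is
--             available with Python when he has reached the campus.
--     """
--
--     max_quantity = 0
--     working_fruits = init_fruits.copy()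
--
--     # Loop through string pattern to update fruit quantities
--     for i, char in enumerate(pattern):
--         assert char in working_fruits.keys() # Make sure that char in initial fruits
--
--         # If character is not last in string pattern
--         # Decrement fruit by one, increment other fruits by one
--         if i != len(pattern) - 1:
--             for key in working_fruits.keys():
--                 if char == key:
--                     working_fruits[key] -= 1
--                 else:
--                     working_fruits[key] += 1
--         # Else if last character in string, just decrement fruit by one
--         else:
--             working_fruits[char] -= 1
--
--     # Find maximum quantity of all fruits at the end
--     for key in working_fruits:
--         if working_fruits[key] > max_quantity:
--             max_quantity = working_fruits[key]
--
--     return max_quantity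
-- ===== SOURCE B (Python) =====
-- def nfruits(init_fruits, pattern):
--     # Validate exactly as A does: every eaten char must be a known fruit.
--     for c in pattern:
--         assert c in init_fruits
--     best = 0
--     n = len(pattern)
--     if n == 0:
--         for q in init_fruits.values():
--             if q > best:
--                 best = q
--         return best
--     last = pattern[-1]
--     cnt = {}
--     for c in pattern:
--         cnt[c] = cnt.get(c, 0) + 1
--     for f, q in init_fruits.items():
--         final = q + (n - 1) - 2 * cnt.get(f, 0) + (1 if f == last else 0)
--         if final > best:
--             best = final
--     return best
-- ===== Notes on version B (the rewrite author's own statement) =====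
-- stated objective: faster
-- what changed: B replaces A's per-character simulation that rewrites every fruit's quantity for each pattern character by a single character-count pass plus a closed-form final quantity per fruit (final = q + n-1 - 2*cnt[f] + (1 if f is the last character else 0)).
import Mathlib
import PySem

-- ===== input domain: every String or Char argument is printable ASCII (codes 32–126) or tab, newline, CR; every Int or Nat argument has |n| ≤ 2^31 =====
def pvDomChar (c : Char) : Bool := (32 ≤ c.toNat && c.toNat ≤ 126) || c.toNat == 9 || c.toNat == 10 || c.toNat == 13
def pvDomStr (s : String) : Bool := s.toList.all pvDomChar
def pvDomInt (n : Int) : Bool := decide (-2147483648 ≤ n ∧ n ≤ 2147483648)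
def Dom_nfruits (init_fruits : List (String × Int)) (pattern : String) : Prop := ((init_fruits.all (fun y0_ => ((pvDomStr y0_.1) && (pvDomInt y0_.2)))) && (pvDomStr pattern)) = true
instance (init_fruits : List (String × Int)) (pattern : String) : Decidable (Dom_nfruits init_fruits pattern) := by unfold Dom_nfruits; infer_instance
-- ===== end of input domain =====

-- B replaces A's per-character simulation over the whole dict by a one-pass character
-- count plus a closed-form final quantity per fruit (objective: faster, O(p + f) vs O(p*f)).

-- ===== PORT A =====
-- Literal port of A. The Python dict argument is the association list via dict-semantics
-- (PySem.Dict.ofList). The 'assert char in working_fruits.keys()' raises AssertionError on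
-- unknown characters; those inputs are excluded by Pre_nfruits, so the port drops the assert.
-- 'working_fruits[key] -= 1' / '+= 1' on a present key is Dict.modify with any default.
def nfruits (init_fruits : List (String × Int)) (pattern : String) : Int :=
  let max_quantity : Int := 0
  let working_fruits := PySem.Dict.ofList init_fruits
  let working_fruits :=
    (PySem.List.enumerate pattern.toList).foldl
      (fun wf (p : Int × Char) =>
        let cs := String.ofList [p.2]
        if p.1 ≠ PySem.Str.len pattern - 1 then
          wf.keys.foldl
            (fun wf2 key =>
              if cs = key then wf2.modify key 0 (· - 1) else wf2.modify key 0 (· + 1)) wf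
        else
          wf.modify cs 0 (· - 1))
      working_fruits
  working_fruits.keys.foldl
    (fun mq key => if working_fruits.getD key 0 > mq then working_fruits.getD key 0 else mq)
    max_quantity

-- ===== PORT B =====
-- Literal port of Source B (the assert is Pre_nfruits, as for A). Characters are compared with
-- string fruit keys in Python; here a pattern char c appears as its 1-char string String.ofList [c].
def nfruits_alt (init_fruits : List (String × Int)) (pattern : String) : Int :=
  let d := PySem.Dict.ofList init_fruits
  let chars := pattern.toList.map (fun c => String.ofList [c])
  let n : Int := PySem.Str.len pattern
  if hne : chars = [] then
    d.values.foldl (fun best q => if q > best then q else best) 0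
  else
    let last := chars.getLast hne   -- pattern[-1], guarded non-empty
    let cnt := chars.foldl (fun c k => c.insert k (c.getD k 0 + 1)) PySem.Dict.empty
    d.items.foldl
      (fun best (fq : String × Int) =>
        let fin := fq.2 + (n - 1) - 2 * cnt.getD fq.1 0 + (if fq.1 = last then 1 else 0)
        if fin > best then fin else best)
      0

-- ===== PRECONDITION & SPEC =====
-- Pre_ excludes exactly the inputs on which A's 'assert char in working_fruits.keys()'
-- raises AssertionError: every pattern character must (as a 1-char string) be a fruit key.
def Pre_nfruits (init_fruits : List (String × Int)) (pattern : String) : Prop :=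
  (pattern.toList.all (fun c => (init_fruits.map Prod.fst).contains (String.ofList [c]))) = true
instance (init_fruits : List (String × Int)) (pattern : String) : Decidable (Pre_nfruits init_fruits pattern) := by unfold Pre_nfruits; infer_instance

def pvWitness_nfruits : (List (String × Int)) × String := ([("A", 1)], "A")

def Spec_nfruits (init_fruits : List (String × Int)) (pattern : String) (out : Int) : Prop := out = nfruits_alt init_fruits pattern
instance (init_fruits : List (String × Int)) (pattern : String) (out : Int) : Decidable (Spec_nfruits init_fruits pattern out) := by unfold Spec_nfruits; infer_instance

-- ===== CLAIM (what is proved, stated in full; the proofs are below) =====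
def Claim_equal_nfruits : Prop := ∀ (init_fruits : List (String × Int)) (pattern : String), Dom_nfruits init_fruits pattern → Pre_nfruits init_fruits pattern → Spec_nfruits init_fruits pattern (nfruits init_fruits pattern)

-- ===== LEMMAS AND PROOFS =====

-- keys of the input dict are exactly the (distinct) first components
theorem mem_keys_ofList (l : List (String × Int)) (k : String) :
    k ∈ (PySem.Dict.ofList l).keys ↔ k ∈ l.map Prod.fst := by
  have h := PySem.Dict.keys_foldl_insert_key (ν := Int) l Prod.fst (fun _ x => x.2) PySem.Dict.empty
  show k ∈ (List.foldl (fun acc p => acc.insert p.1 p.2) PySem.Dict.empty l).keys ↔ _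
  rw [h]
  simp [PySem.Set.mem_update, PySem.Dict.keys_empty]

-- A's inner loop over a list of present keys: keys are preserved
theorem innerFold_keys (cs : String) (ks : List String) (d : PySem.Dict String Int)
    (h : ∀ key ∈ ks, key ∈ d.keys) :
    ((ks.foldl (fun wf2 key =>
        if cs = key then wf2.modify key 0 (· - 1) else wf2.modify key 0 (· + 1)) d).keys) = d.keys := by
  induction ks generalizing d with
  | nil => rfl
  | cons a t ih =>
    have ha : a ∈ d.keys := h a (by simp)
    have hca : d.contains a = true := (PySem.Dict.contains_iff_mem_keys d a).mpr ha
    have hstep : ∀ (e : PySem.Dict String Int), e.contains a = true →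
        (if cs = a then e.modify a 0 (· - 1) else e.modify a 0 (· + 1)).keys = e.keys := by
      intro e hc
      split_ifs <;> rw [PySem.Dict.keys_modify, PySem.Dict.keys_insert_of_contains _ _ hc]
    simp only [List.foldl_cons]
    rw [ih _ (fun key hk => by rw [hstep d hca]; exact h key (by simp [hk])), hstep d hca]

-- A's inner loop: value at k changes by -1 if k = cs, +1 if k is another key, else unchanged
theorem innerFold_getD (cs : String) (ks : List String) (hnd : ks.Nodup)
    (d : PySem.Dict String Int) (k : String) :
    ((ks.foldl (fun wf2 key =>
        if cs = key then wf2.modify key 0 (· - 1) else wf2.modify key 0 (· + 1)) d).getD k 0) =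
      if k ∈ ks then (if cs = k then d.getD k 0 - 1 else d.getD k 0 + 1) else d.getD k 0 := by
  induction ks generalizing d with
  | nil => simp
  | cons a t ih =>
    have hnd' : t.Nodup := hnd.of_cons
    have hat : a ∉ t := (List.nodup_cons.mp hnd).1
    have hstepD : ∀ (e : PySem.Dict String Int) (x : String),
        (if cs = a then e.modify a 0 (· - 1) else e.modify a 0 (· + 1)).getD x 0 =
          if x = a then (if cs = a then e.getD a 0 - 1 else e.getD a 0 + 1) else e.getD x 0 := by
      intro e x
      by_cases h1 : cs = a <;> by_cases h2 : x = a <;>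
        simp [h1, h2, PySem.Dict.getD_modify]
    simp only [List.foldl_cons]
    rw [ih hnd']
    by_cases hk : k = a
    · subst hk
      simp [hat, hstepD]
    · simp [hk, hstepD, List.mem_cons]

-- A's outer loop restricted to non-final characters (each step runs the inner loop)
theorem outer_inv (l : List Char) (d : PySem.Dict String Int) (hnd : d.keys.Nodup) :
    (((l.foldl (fun wf ch =>
        wf.keys.foldl (fun wf2 key =>
          if String.ofList [ch] = key then wf2.modify key 0 (· - 1) else wf2.modify key 0 (· + 1)) wf) d)).keys = d.keys) ∧
    (∀ k, ((l.foldl (fun wf ch =>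
        wf.keys.foldl (fun wf2 key =>
          if String.ofList [ch] = key then wf2.modify key 0 (· - 1) else wf2.modify key 0 (· + 1)) wf) d)).getD k 0 =
      if k ∈ d.keys then d.getD k 0 + l.length - 2 * ((l.map (fun c => String.ofList [c])).count k) else d.getD k 0) := by
  induction l generalizing d with
  | nil => simp
  | cons ch t ih =>
    simp only [List.foldl_cons]
    set e := d.keys.foldl (fun wf2 key =>
      if String.ofList [ch] = key then wf2.modify key 0 (· - 1) else wf2.modify key 0 (· + 1)) d with he
    have hkeys : e.keys = d.keys := innerFold_keys _ _ _ (fun _ hk => hk)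
    have hval : ∀ k, e.getD k 0 =
        if k ∈ d.keys then (if String.ofList [ch] = k then d.getD k 0 - 1 else d.getD k 0 + 1) else d.getD k 0 :=
      fun k => innerFold_getD _ _ hnd d k
    obtain ⟨ihk, ihv⟩ := ih e (hkeys ▸ hnd)
    refine ⟨by rw [ihk, hkeys], fun k => ?_⟩
    rw [ihv k, hkeys, hval k]
    by_cases hk : k ∈ d.keys
    · simp only [hk, if_true, List.map_cons, List.count_cons, List.length_cons]
      by_cases hc : String.ofList [ch] = k
      · simp [hc]; ring
      · simp [hc]; ring
    · simp [hk]

-- ===== VERDICT (by name: the statement is the Claim_ definition above) =====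
theorem nfruits_spec : Claim_equal_nfruits := by
  intro init_fruits pattern _hdom hpre
  unfold Spec_nfruits
  simp only [nfruits, nfruits_alt]
  have hnd : (PySem.Dict.ofList init_fruits).keys.Nodup := PySem.Dict.nodup_keys_ofList init_fruits
  have hmemk : ∀ c ∈ pattern.toList, String.ofList [c] ∈ (PySem.Dict.ofList init_fruits).keys := by
    intro c hc
    rw [mem_keys_ofList]
    exact List.contains_iff_mem.mp (List.all_eq_true.mp hpre c hc)
  rcases List.eq_nil_or_concat pattern.toList with hnil | ⟨ini, c, hsplit⟩
  · -- empty pattern: A leaves the dict untouched; B maxes over the values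
    rw [hnil]
    simp only [List.map_nil, PySem.List.enumerate, List.foldl_nil]
    rw [dif_pos True.intro, PySem.Dict.values_eq_map_keys _ hnd 0, List.foldl_map]
  · -- pattern = ini ++ [c]: split the loop at the final character
    have hcl : String.ofList [c] ∈ (PySem.Dict.ofList init_fruits).keys :=
      hmemk c (by rw [hsplit]; simp)
    have hlen : PySem.Str.len pattern = (ini.length : Int) + 1 := by
      rw [PySem.Str.len_eq, hsplit]; simp
    have hchars : pattern.toList.map (fun ch => String.ofList [ch]) =
        ini.map (fun ch => String.ofList [ch]) ++ [String.ofList [c]] := by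
      rw [hsplit]; simp
    have hne : pattern.toList.map (fun ch => String.ofList [ch]) ≠ [] := by
      intro h; rw [hchars] at h; simp at h
    rw [dif_neg hne]
    -- B's pattern[-1] and counter
    have hlast : (pattern.toList.map (fun ch => String.ofList [ch])).getLast hne = String.ofList [c] := by
      rw [List.getLast_congr _ (fun h => by simp at h) hchars]
      simp
    have hcnt : ∀ f, ((pattern.toList.map (fun ch => String.ofList [ch])).foldl
        (fun cn k => cn.insert k (cn.getD k 0 + 1)) PySem.Dict.empty).getD f 0 =
        ((ini.map (fun ch => String.ofList [ch])).count f : Int) + (if f = String.ofList [c] then 1 else 0) := by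
      intro f
      rw [PySem.Dict.getD_foldl_insert_add_one, PySem.Dict.getD_empty, hchars]
      by_cases hf : f = String.ofList [c] <;>
        simp [List.count_append, hf, List.count_eq_zero]
    -- A's loop: all but the last step take the first branch
    conv_lhs => rw [hsplit, List.concat_eq_append, PySem.List.enumerate_append, List.foldl_append]
    have hstep1 : (PySem.List.enumerate ini 0).foldl
        (fun wf (p : Int × Char) =>
          if p.1 ≠ PySem.Str.len pattern - 1 then
            wf.keys.foldl (fun wf2 key =>
              if String.ofList [p.2] = key then wf2.modify key 0 (· - 1) else wf2.modify key 0 (· + 1)) wf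
          else
            wf.modify (String.ofList [p.2]) 0 (· - 1)) (PySem.Dict.ofList init_fruits) =
        ini.foldl (fun wf ch =>
          wf.keys.foldl (fun wf2 key =>
            if String.ofList [ch] = key then wf2.modify key 0 (· - 1) else wf2.modify key 0 (· + 1)) wf)
          (PySem.Dict.ofList init_fruits) := by
      rw [PySem.List.foldl_congr_mem _ _
        (fun wf (p : Int × Char) =>
          wf.keys.foldl (fun wf2 key =>
            if String.ofList [p.2] = key then wf2.modify key 0 (· - 1) else wf2.modify key 0 (· + 1)) wf) _ ?_]
      · conv_rhs => rw [← PySem.List.map_snd_enumerate ini 0]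
        rw [List.foldl_map]
      · intro acc p hp
        rw [PySem.List.mem_enumerate_iff] at hp
        obtain ⟨k, hk, rfl⟩ := hp
        have : (0 : Int) + k ≠ PySem.Str.len pattern - 1 := by
          rw [hlen]; omega
        rw [if_pos this]
    rw [hstep1]
    obtain ⟨hK, hV⟩ := outer_inv ini (PySem.Dict.ofList init_fruits) hnd
    set W1 := ini.foldl (fun wf ch =>
      wf.keys.foldl (fun wf2 key =>
        if String.ofList [ch] = key then wf2.modify key 0 (· - 1) else wf2.modify key 0 (· + 1)) wf)
      (PySem.Dict.ofList init_fruits) with hW1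
    -- the last character: index = ini.length = n - 1, so the else branch runs
    simp only [PySem.List.enumerate_cons, PySem.List.enumerate_nil, List.foldl_cons, List.foldl_nil]
    rw [if_neg (by rw [hlen]; omega)]
    -- final dict: keys and values
    have hclW1 : W1.contains (String.ofList [c]) = true :=
      (PySem.Dict.contains_iff_mem_keys _ _).mpr (by rw [hK]; exact hcl)
    have hKF : (W1.modify (String.ofList [c]) 0 (· - 1)).keys = (PySem.Dict.ofList init_fruits).keys := by
      rw [PySem.Dict.keys_modify, PySem.Dict.keys_insert_of_contains _ _ hclW1, hK]
    have hVF : ∀ k ∈ (PySem.Dict.ofList init_fruits).keys,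
        (W1.modify (String.ofList [c]) 0 (· - 1)).getD k 0 =
          (PySem.Dict.ofList init_fruits).getD k 0 + (PySem.Str.len pattern - 1)
            - 2 * (((ini.map (fun ch => String.ofList [ch])).count k : Int)
                    + (if k = String.ofList [c] then 1 else 0))
            + (if k = String.ofList [c] then 1 else 0) := by
      intro k hk
      rw [PySem.Dict.getD_modify]
      by_cases hkc : k = String.ofList [c]
      · subst hkc
        simp only [hV, hk, if_true, hlen]
        ring
      · simp only [if_neg hkc, hV, hk, if_true, hlen]
        ring
    -- both final passes are the same fold over the same keys
    rw [hKF, PySem.Dict.items_eq_map_keys _ hnd 0, List.foldl_map]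
    apply PySem.List.foldl_congr_mem
    intro acc k hk
    rw [hVF k hk, hcnt k, hlast]
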